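-- pv_equiv track=rewrite | github.com/NandaKumar-21/hackrx | search_engine.py | find_most_relevant_chunk
-- ===== SOURCE A (Python) =====
-- from typing import List, Tuple
--
-- def find_most_relevant_chunk(query: str, chunks: List[str]) -> Tuple[List[str], List[float]]:
--     # Naive similarity using common words
--     query_words = set(query.lower().split())
--     scores = []
--
--     for chunk in chunks:
--         chunk_words = set(chunk.lower().split())
--         overlap = query_words.intersection(chunk_words)
--         scores.append(len(overlap))
--
--     top_index = sorted(range(len(scores)), key=lambda i: scores[i], reverse=True)[:1]
--     best_chunks = [chunks[i] for i in top_index]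
--     best_scores = [scores[i] for i in top_index]
--
--     return best_chunks, best_scores
-- ===== SOURCE B (Python) =====
-- from typing import List, Tuple
--
-- def find_most_relevant_chunk(query: str, chunks: List[str]) -> Tuple[List[str], List[float]]:
--     # Single max-tracking pass: no scores list, no sort.
--     query_words = set(query.lower().split())
--     best_index = -1
--     best_score = 0
--     for i, chunk in enumerate(chunks):
--         score = len(query_words & set(chunk.lower().split()))
--         if best_index < 0 or score > best_score:
--             best_index, best_score = i, score
--     if best_index < 0:
--         return [], []
--     return [chunks[best_index]], [best_score]
-- ===== Notes on version B (the rewrite author's own statement) =====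
-- stated objective: simpler
-- what changed: Replaces the build-all-scores list plus stable reverse sort of indices by a single pass that tracks the running best index and score with a strict-greater update (first index wins ties, matching the stable sort).
import Mathlib
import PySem

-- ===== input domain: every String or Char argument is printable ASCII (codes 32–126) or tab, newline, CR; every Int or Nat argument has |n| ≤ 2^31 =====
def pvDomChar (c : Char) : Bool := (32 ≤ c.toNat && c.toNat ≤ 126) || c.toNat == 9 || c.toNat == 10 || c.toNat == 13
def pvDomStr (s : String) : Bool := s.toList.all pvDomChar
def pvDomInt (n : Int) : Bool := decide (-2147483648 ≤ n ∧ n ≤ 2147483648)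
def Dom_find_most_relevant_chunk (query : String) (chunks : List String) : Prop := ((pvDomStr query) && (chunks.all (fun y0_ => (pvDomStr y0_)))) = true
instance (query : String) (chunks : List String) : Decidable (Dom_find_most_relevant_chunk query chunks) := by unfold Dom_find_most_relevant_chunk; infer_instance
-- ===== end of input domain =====

-- B replaces A's build-all-scores list + stable reverse index sort by a single
-- max-tracking pass (strict-greater update, so the first index wins ties): simpler.

-- ===== PORT A =====
def find_most_relevant_chunk (query : String) (chunks : List String) : List String × List Int :=
  let query_words : PySem.Set String := PySem.Set.ofList (PySem.Str.split₀ (PySem.Str.lower query))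
  let scores : List Int := chunks.foldl (fun acc chunk =>
    acc ++ [PySem.Set.len (PySem.Set.inter query_words
      (PySem.Set.ofList (PySem.Str.split₀ (PySem.Str.lower chunk))))]) []
  let top_index : List Int :=
    PySem.List.slice
      (PySem.List.sorted (PySem.List.pyRange 0 (PySem.List.len scores) 1)
        (fun i => PySem.List.pyGetD scores i 0) true)
      none (some 1)
  (top_index.map (fun i => PySem.List.pyGetD chunks i ""),
   top_index.map (fun i => PySem.List.pyGetD scores i 0))

-- ===== PORT B =====
def find_most_relevant_chunk_alt (query : String) (chunks : List String) : List String × List Int :=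
  let query_words : PySem.Set String := PySem.Set.ofList (PySem.Str.split₀ (PySem.Str.lower query))
  let st : Int × Int := (PySem.List.enumerate chunks).foldl
    (fun (st : Int × Int) (p : Int × String) =>
      let score := PySem.Set.len (PySem.Set.inter query_words
        (PySem.Set.ofList (PySem.Str.split₀ (PySem.Str.lower p.2))))
      if st.1 < 0 || st.2 < score then (p.1, score) else st) (-1, 0)
  if st.1 < 0 then ([], [])
  else ([PySem.List.pyGetD chunks st.1 ""], [st.2])

-- ===== PRECONDITION & SPEC =====
def Spec_find_most_relevant_chunk (query : String) (chunks : List String) (out : List String × List Int) : Prop := out = find_most_relevant_chunk_alt query chunks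
instance (query : String) (chunks : List String) (out : List String × List Int) : Decidable (Spec_find_most_relevant_chunk query chunks out) := by unfold Spec_find_most_relevant_chunk; infer_instance

-- ===== CLAIM (what is proved, stated in full; the proofs are below) =====
def Claim_equal_find_most_relevant_chunk : Prop := ∀ (query : String) (chunks : List String), Dom_find_most_relevant_chunk query chunks → Spec_find_most_relevant_chunk query chunks (find_most_relevant_chunk query chunks)

-- ===== LEMMAS AND PROOFS =====

def pvOptStep {α : Type} (key : α → Int) (h : Option α) (x : α) : Option α :=
  match h with
  | none => some x
  | some m => if key m < key x then some x else some m

-- head of `insertBy` for the reverse-sort predicate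
theorem pv_head_insertBy {α : Type} (key : α → Int) (x : α) (acc : List α) :
    (PySem.List.insertBy (fun a b => decide (key b < key a)) x acc).head? =
      pvOptStep key acc.head? x := by
  cases acc with
  | nil => simp [PySem.List.insertBy, pvOptStep]
  | cons y ys =>
    by_cases h : key y < key x <;> simp [PySem.List.insertBy, pvOptStep, h]

-- head of the insertion-sort fold is a left max-fold
theorem pv_headfold {α : Type} (key : α → Int) (l : List α) (acc : List α) :
    (l.foldl (fun a x => PySem.List.insertBy (fun a b => decide (key b < key a)) x a) acc).head? =
      l.foldl (pvOptStep key) acc.head? := by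
  induction l generalizing acc with
  | nil => rfl
  | cons x xs ih =>
    simp only [List.foldl_cons]
    rw [ih, pv_head_insertBy]

def pvCorr (key1 k : Int → Int) (h : Option Int) (st : Int × Int) : Prop :=
  (h = none ∧ st = (-1, 0)) ∨ ∃ m, h = some m ∧ 0 ≤ m ∧ key1 m = k m ∧ st = (m, k m)

-- the option max-fold and B's pair fold stay in correspondence
theorem pv_foldrel (key1 k : Int → Int) (l : List Int)
    (hl : ∀ j ∈ l, 0 ≤ j ∧ key1 j = k j) (h : Option Int) (st : Int × Int)
    (hc : pvCorr key1 k h st) :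
    pvCorr key1 k
      (l.foldl (pvOptStep key1) h)
      (l.foldl (fun st j => if st.1 < 0 || st.2 < k j then (j, k j) else st) st) := by
  induction l generalizing h st with
  | nil => exact hc
  | cons x xs ih =>
    have hx := hl x (by simp)
    refine ih (fun j hj => hl j (by simp [hj])) _ _ ?_
    rcases hc with ⟨hn, hs⟩ | ⟨m, hm, hm0, hkm, hs⟩
    · subst hn hs
      right
      exact ⟨x, by simp [pvOptStep], hx.1, hx.2, by norm_num⟩
    · subst hm hs
      have hm' : ¬ (m < 0) := not_lt.mpr hm0
      by_cases hlt : key1 m < key1 x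
      · have hk' : k m < k x := by rw [← hkm, ← hx.2]; exact hlt
        right
        exact ⟨x, by simp [pvOptStep, hlt], hx.1, hx.2, by simp [hm', hk']⟩
      · have hk' : ¬ k m < k x := by rw [← hkm, ← hx.2]; exact hlt
        right
        exact ⟨m, by simp [pvOptStep, hlt], hm0, hkm, by simp [hm', hk']⟩

-- A's select-by-sort equals B's max-tracking pass, for any scoring function g
theorem pv_gen (g : String → Int) (chunks : List String) :
    (let scores : List Int := chunks.map g
     let top : List Int :=
       PySem.List.slice
         (PySem.List.sorted (PySem.List.pyRange 0 (PySem.List.len scores) 1)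
           (fun i => PySem.List.pyGetD scores i 0) true) none (some 1)
     ((top.map fun i => PySem.List.pyGetD chunks i ""),
       top.map fun i => PySem.List.pyGetD scores i 0)) =
    (let st : Int × Int := (PySem.List.pyRange 0 (PySem.List.len chunks) 1).foldl
       (fun st j => if st.1 < 0 || st.2 < g (PySem.List.pyGetD chunks j "") then
          (j, g (PySem.List.pyGetD chunks j "")) else st) (-1, 0)
     if st.1 < 0 then ([], [])
     else ([PySem.List.pyGetD chunks st.1 ""], [st.2])) := by
  simp only []
  set scores : List Int := chunks.map g with hscores
  set n : Int := PySem.List.len scores with hn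
  set key1 : Int → Int := fun i => PySem.List.pyGetD scores i 0 with hkey1
  have hlenc : PySem.List.len chunks = n := by
    simp [hn, hscores, PySem.List.len_eq]
  rw [hlenc]
  have hA := (congrArg List.head?
      (PySem.List.sorted_rev_eq_foldl_insertBy (PySem.List.pyRange 0 n 1) key1)).trans
    (pv_headfold key1 (PySem.List.pyRange 0 n 1) [])
  have hmem : ∀ j ∈ PySem.List.pyRange 0 n 1, 0 ≤ j ∧ key1 j = g (PySem.List.pyGetD chunks j "") := by
    intro j hj
    rw [PySem.List.mem_pyRange_one] at hj
    obtain ⟨hj0, hjn⟩ := hj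
    refine ⟨hj0, ?_⟩
    have hjlt : j.toNat < chunks.length := by
      have hnl : n = (chunks.length : Int) := by simp [hn, hscores, PySem.List.len_eq]
      omega
    simp only [hkey1, hscores]
    rw [PySem.List.pyGetD_of_nonneg _ _ hj0, PySem.List.pyGetD_of_nonneg _ _ hj0]
    rw [List.getD_eq_getElem _ _ (by simpa using hjlt), List.getD_eq_getElem _ _ hjlt]
    simp
  have hcorr := pv_foldrel key1 (fun j => g (PySem.List.pyGetD chunks j ""))
    (PySem.List.pyRange 0 n 1) hmem (([] : List Int).head?) (-1, 0) (Or.inl ⟨by simp, rfl⟩)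
  rcases hcorr with ⟨hnone, hst⟩ | ⟨m, hsome, hm0, hkmk, hst⟩
  · -- empty result: the sorted list is nil
    have hsnil : PySem.List.sorted (PySem.List.pyRange 0 n 1) key1 true = [] := by
      rcases hy : PySem.List.sorted (PySem.List.pyRange 0 n 1) key1 true with _ | ⟨a, t⟩
      · rfl
      · exfalso
        have h1 : (PySem.List.sorted (PySem.List.pyRange 0 n 1) key1 true).head? = some a := by
          rw [hy]; rfl
        rw [hA, hnone] at h1
        simp at h1
    rw [hsnil]
    simp only [hst]
    simp [PySem.List.slice]
  · -- nonempty: the sorted head is the first argmax m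
    rcases hy : PySem.List.sorted (PySem.List.pyRange 0 n 1) key1 true with _ | ⟨a, t⟩
    · exfalso
      have h1 : (PySem.List.sorted (PySem.List.pyRange 0 n 1) key1 true).head? = none := by
        rw [hy]; rfl
      rw [hA, hsome] at h1
      simp at h1
    have h1 : (PySem.List.sorted (PySem.List.pyRange 0 n 1) key1 true).head? = some a := by
      rw [hy]; rfl
    rw [hA, hsome] at h1
    obtain rfl : a = m := by injection h1 with h; exact h.symm
    simp only [hst]
    have hnot : ¬ (a < 0) := not_lt.mpr hm0
    rw [PySem.List.slice_to _ (by norm_num)]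
    simp [hnot, ← hkmk]

theorem pv_main (query : String) (chunks : List String) :
    find_most_relevant_chunk query chunks = find_most_relevant_chunk_alt query chunks := by
  unfold find_most_relevant_chunk find_most_relevant_chunk_alt
  simp only [PySem.List.foldl_append_singleton_eq_map, List.nil_append,
    PySem.List.enumerate_eq_map_pyRange chunks "", List.foldl_map]
  exact pv_gen (fun chunk =>
    PySem.Set.len (PySem.Set.inter (PySem.Set.ofList (PySem.Str.split₀ (PySem.Str.lower query)))
      (PySem.Set.ofList (PySem.Str.split₀ (PySem.Str.lower chunk))))) chunks

-- ===== VERDICT (by name: the statement is the Claim_ definition above) =====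
theorem find_most_relevant_chunk_spec : Claim_equal_find_most_relevant_chunk := by
  intro query chunks _
  unfold Spec_find_most_relevant_chunk
  exact pv_main query chunks
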